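-- pv_equiv track=rewrite | github.com/rnhkz/ProblemSolutions | Categories/categories.py | get_maximum_maxima
-- ===== SOURCE A (Python) =====
-- def get_maximum_maxima(categories):
--     #Dict: Category : Term
--     #       Term[0] = Counts number of occurences in categories for the particular category
--     #       Term[1] = Keeps a record of the value of Term[0] at previous points in time
--     #       A unit of time here is equivalent to processing one category
--     #maxArr: An array of arrays representing a record of which category had the most amount of occurences in categories[:i+1]
--     #maxArr[i] = Categories of the maximum of Term[1][i] across all categories
--
--     Dict = {}
--     maxArr = []
--
--     #We go through categories, adding a term for each category to Dict
--     #There are two items stored in a term: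
--     #   Term[0] = Counts number of occurences in categories for the particular category
--     #   Term[1] = Keeps a record of the value of Term[0] at previous points in time
--     #   A unit of time here is equivalent to processing one category
--
--     for category in categories:
--         if not Dict.get(category):
--             Dict[category] = [0, []]
--
--     #We find the category with the most amount of occurences after processing one category in categories
--     #The found category is recorded in maxArr
--     #maxArr[i] = The categories with most occurences in categories[:i+1]
--
--     for x, c in enumerate(categories):
--         for i, v in dict.items(Dict):
--             if c == i:
--                 v[0] += 1
--             v[1].append(v[0])
--
--         currentMax = [0, {}]
--         for i, v in dict.items(Dict):
--             if v[1][x] > currentMax[0]: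
--                 currentMax[0] = v[1][x]
--                 currentMax[1] = {i}
--             elif v[1][x] == currentMax[0]:
--                 currentMax[0] = v[1][x]
--                 currentMax[1].add(i)
--         maxArr.append(currentMax[1])
--
--     #We create a map denoting length of longest substring containing a single category in maxArr, for every category
--     Dict2 = {}
--     for cats in maxArr:
--         for c in cats:
--             if not Dict2.get(c):
--                 Dict2[c] = 0
--             Dict2[c] += 1
--
--     return max(dict.values(Dict2))
-- ===== SOURCE B (Python) =====
-- def get_maximum_maxima(categories):
--     # Single pass: incremental counts, maintained set of current leaders,
--     # and per-category win counters updated as we go.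
--     counts = {}
--     wins = {}
--     curmax = 0
--     leaders = []  # categories whose count equals curmax, no duplicates
--     for c in categories:
--         n = counts.get(c, 0) + 1
--         counts[c] = n
--         if n > curmax:
--             curmax = n
--             leaders = [c]
--         elif n == curmax:
--             leaders.append(c)
--         for k in leaders:
--             wins[k] = wins.get(k, 0) + 1
--     return max(wins.values())
-- ===== Notes on version B (the rewrite author's own statement) =====
-- stated objective: faster
-- what changed: A rescans all categories for every prefix over per-category history arrays, builds per-prefix argmax sets and then counts them; B makes a single pass keeping incremental counts, a maintained current-leaders set and running per-category win counters.
import Mathlib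
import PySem

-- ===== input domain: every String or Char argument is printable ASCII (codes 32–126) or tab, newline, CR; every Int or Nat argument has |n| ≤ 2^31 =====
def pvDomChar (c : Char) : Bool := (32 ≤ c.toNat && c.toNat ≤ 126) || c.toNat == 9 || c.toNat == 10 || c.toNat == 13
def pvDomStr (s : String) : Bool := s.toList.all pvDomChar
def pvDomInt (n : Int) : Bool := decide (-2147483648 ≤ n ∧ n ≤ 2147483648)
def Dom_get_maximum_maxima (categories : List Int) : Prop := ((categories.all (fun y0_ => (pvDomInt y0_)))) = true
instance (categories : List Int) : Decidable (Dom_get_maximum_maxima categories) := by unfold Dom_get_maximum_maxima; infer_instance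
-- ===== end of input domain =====

-- B replaces A's per-prefix rescan over per-category history arrays by one pass with incremental
-- counts, a maintained current-leaders set and running win counters (measured much faster).

-- ===== PORT A =====
-- Python's `if not Dict.get(category)` tests key absence: the stored value [0, []] is a nonempty
-- list, hence always truthy.
def aSeed (d : PySem.Dict Int (Int × List Int)) (category : Int) : PySem.Dict Int (Int × List Int) :=
  if (d.get? category).isNone then d.insert category ((0 : Int), ([] : List Int)) else d

-- One iteration of A's main loop (xc = (x, c) from enumerate(categories)).
-- currentMax[1] starts as Python's empty dict {}; the first dict item (the first category, whose
-- running count is positive at every step) always takes the `>` branch and replaces it with a set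
-- before any `.add` can be reached, so it is modelled as the empty PySem.Set.
-- v[1][x] is always in range (the history has length x+1), so pyGetD's default is never used.
def aStep (st : PySem.Dict Int (Int × List Int) × List (PySem.Set Int)) (xc : Int × Int) :
    PySem.Dict Int (Int × List Int) × List (PySem.Set Int) :=
  let x := xc.1
  let c := xc.2
  let d : PySem.Dict Int (Int × List Int) :=
    PySem.Dict.mk (st.1.items.map (fun p =>
      let v0 := if c == p.1 then p.2.1 + 1 else p.2.1
      (p.1, (v0, p.2.2 ++ [v0]))))
  let cm : Int × PySem.Set Int :=
    d.items.foldl (fun cm p =>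
      let vx := PySem.List.pyGetD p.2.2 x 0
      if vx > cm.1 then (vx, [p.1])
      else if vx == cm.1 then (cm.1, PySem.Set.add cm.2 p.1)
      else cm) (0, PySem.Set.empty)
  (d, st.2 ++ [cm.2])

-- `if not Dict2.get(c)` is true when c is absent or maps to 0; `Dict2[c] += 1` then has c present.
def aCount (d2 : PySem.Dict Int Int) (c : Int) : PySem.Dict Int Int :=
  let d2 := if d2.getD c 0 == 0 then d2.insert c 0 else d2
  d2.modify c 0 (· + 1)

-- max() on the empty dict (categories = []) raises ValueError: excluded by Pre_.
def get_maximum_maxima (categories : List Int) : Int :=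
  let dict0 : PySem.Dict Int (Int × List Int) := categories.foldl aSeed PySem.Dict.empty
  let st := (PySem.List.enumerate categories 0).foldl aStep (dict0, [])
  let dict2 : PySem.Dict Int Int :=
    st.2.foldl (fun d2 cats => cats.foldl aCount d2) PySem.Dict.empty
  (PySem.List.max? dict2.values (fun v => v)).getD 0

-- ===== PORT B =====
-- state = (counts, wins, curmax, leaders)
def bStep (st : PySem.Dict Int Int × PySem.Dict Int Int × Int × List Int) (c : Int) :
    PySem.Dict Int Int × PySem.Dict Int Int × Int × List Int :=
  let n := st.1.getD c 0 + 1
  let counts := st.1.insert c n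
  let cl : Int × List Int :=
    if n > st.2.2.1 then (n, [c])
    else if n == st.2.2.1 then (st.2.2.1, st.2.2.2 ++ [c])
    else (st.2.2.1, st.2.2.2)
  let wins := cl.2.foldl (fun w k => w.insert k (w.getD k 0 + 1)) st.2.1
  (counts, wins, cl.1, cl.2)

-- max() on the empty wins dict (categories = []) raises ValueError: excluded by Pre_.
def get_maximum_maxima_alt (categories : List Int) : Int :=
  let st := categories.foldl bStep (PySem.Dict.empty, PySem.Dict.empty, 0, [])
  (PySem.List.max? st.2.1.values (fun v => v)).getD 0

-- ===== PRECONDITION & SPEC =====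
-- Pre_ excludes only the empty list, on which the Python A raises ValueError (max of an empty dict).
def Pre_get_maximum_maxima (categories : List Int) : Prop := categories ≠ []
instance (categories : List Int) : Decidable (Pre_get_maximum_maxima categories) := by
  unfold Pre_get_maximum_maxima; infer_instance
def pvWitness_get_maximum_maxima : List Int := [0]
def Spec_get_maximum_maxima (categories : List Int) (out : Int) : Prop := out = get_maximum_maxima_alt categories
instance (categories : List Int) (out : Int) : Decidable (Spec_get_maximum_maxima categories out) := by
  unfold Spec_get_maximum_maxima; infer_instance

-- ===== CLAIM (what is proved, stated in full; the proofs are below) =====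
def Claim_equal_get_maximum_maxima : Prop := ∀ (categories : List Int), Dom_get_maximum_maxima categories → Pre_get_maximum_maxima categories → Spec_get_maximum_maxima categories (get_maximum_maxima categories)

-- ===== LEMMAS AND PROOFS =====

-- `pvCnt k P` = number of occurrences of k in the prefix P, as an Int.
def pvCnt (k : Int) (P : List Int) : Int := (P.count k : Int)
-- `pvM P` = the maximal occurrence count over the prefix P (0 for the empty prefix).
def pvM (P : List Int) : Int := (P.map (fun k => pvCnt k P)).foldl max 0
-- k is one of the most common categories of the prefix L[:t+1]
def pvLead (L : List Int) (t : Nat) (k : Int) : Prop := pvCnt k (L.take (t+1)) = pvM (L.take (t+1))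
-- number of prefixes of L whose leader set contains k
def pvW (L : List Int) (k : Int) : Int :=
  (((List.range L.length).countP
      (fun t => pvCnt k (L.take (t+1)) == pvM (L.take (t+1))) : Nat) : Int)
-- canonical state of A's main loop after processing the whole of L, keys fixed to K
def canonD (K L : List Int) : PySem.Dict Int (Int × List Int) :=
  PySem.Dict.mk (K.map (fun k =>
    (k, (pvCnt k L, (List.range L.length).map (fun j => pvCnt k (L.take (j+1)))))))
def canonS (K L : List Int) (t : Nat) : List Int :=
  K.filter (fun k => pvCnt k (L.take (t+1)) == pvM (L.take (t+1)))
-- B's loop invariant, relative to the processed prefix P: exact counts, current max,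
-- the leaders list is exactly the argmax set, and wins counts prefixes led so far.
def InvB (P : List Int) (st : PySem.Dict Int Int × PySem.Dict Int Int × Int × List Int) : Prop :=
  (∀ k, st.1.getD k 0 = pvCnt k P) ∧
  st.2.2.1 = pvM P ∧
  st.2.2.2.Nodup ∧
  (∀ k, k ∈ st.2.2.2 ↔ (P ≠ [] ∧ pvCnt k P = pvM P)) ∧
  st.2.1.keys.Nodup ∧
  (∀ k, k ∈ st.2.1.keys ↔ ∃ t < P.length, pvLead P t k) ∧
  (∀ k, st.2.1.getD k 0 = pvW P k)

lemma cnt_append_singleton (k c : Int) (P : List Int) :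
    pvCnt k (P ++ [c]) = pvCnt k P + (if c == k then 1 else 0) := by
  simp only [pvCnt, List.count_append, List.count_singleton]
  push_cast
  split <;> simp_all

lemma pvM_nonneg (P : List Int) : 0 ≤ pvM P := by
  unfold pvM
  exact (PySem.List.le_foldl_max_int (P.map (fun k => pvCnt k P)) (fun v => v) 0).1

lemma cnt_le_pvM (k : Int) (P : List Int) : pvCnt k P ≤ pvM P := by
  by_cases h : k ∈ P
  · unfold pvM
    rw [List.foldl_map]
    exact (PySem.List.le_foldl_max_int P (fun k => pvCnt k P) 0).2 k h
  · have : pvCnt k P = 0 := by simp [pvCnt, List.count_eq_zero_of_not_mem h]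
    rw [this]; exact pvM_nonneg P

lemma pvM_pos (P : List Int) (h : P ≠ []) : 0 < pvM P := by
  obtain ⟨a, t, rfl⟩ := List.exists_cons_of_ne_nil h
  have h1 : (1:Int) ≤ pvCnt a (a :: t) := by
    have := List.count_pos_iff.mpr (List.mem_cons_self (a := a) (l := t))
    unfold pvCnt; exact_mod_cast this
  linarith [cnt_le_pvM a (a :: t)]

lemma pvM_mem_or (P : List Int) : pvM P = 0 ∨ ∃ k ∈ P, pvCnt k P = pvM P := by
  unfold pvM
  rcases PySem.List.foldl_max_mem (P.map (fun k => pvCnt k P)) 0 with h | h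
  · exact Or.inl h
  · right
    obtain ⟨k, hk, he⟩ := List.mem_map.mp h
    exact ⟨k, hk, he⟩

lemma pvM_append (P : List Int) (c : Int) :
    pvM (P ++ [c]) = max (pvM P) (pvCnt c (P ++ [c])) := by
  apply le_antisymm
  · rcases pvM_mem_or (P ++ [c]) with h | ⟨k, hk, he⟩
    · rw [h]
      exact le_max_of_le_left (pvM_nonneg P)
    · rw [← he]
      rcases List.mem_append.mp hk with hk | hk
      · by_cases hkc : k = c
        · subst hkc; exact le_max_right _ _
        · have : pvCnt k (P ++ [c]) = pvCnt k P := by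
            rw [cnt_append_singleton]; simp [Ne.symm hkc]
          rw [this]
          exact le_trans (cnt_le_pvM k P) (le_max_left _ _)
      · simp at hk; subst hk; exact le_max_right _ _
  · apply max_le
    · rcases pvM_mem_or P with h | ⟨k, hk, he⟩
      · rw [h]; exact pvM_nonneg _
      · rw [← he]
        calc pvCnt k P ≤ pvCnt k (P ++ [c]) := by
              rw [cnt_append_singleton]; split <;> omega
          _ ≤ pvM (P ++ [c]) := cnt_le_pvM _ _
    · exact cnt_le_pvM _ _

lemma pvLead_prefix (P R : List Int) (t : Nat) (k : Int) (ht : t < P.length) :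
    pvLead (P ++ R) t k ↔ pvLead P t k := by
  unfold pvLead
  rw [List.take_append_of_le_length (by exact ht)]

lemma pvLead_mem (L : List Int) (t : Nat) (k : Int) (ht : t < L.length) (h : pvLead L t k) :
    k ∈ L := by
  unfold pvLead at h
  have hne : L.take (t+1) ≠ [] := by
    apply List.ne_nil_of_length_pos
    rw [List.length_take]
    omega
  have := pvM_pos _ hne
  rw [← h] at this
  have : k ∈ L.take (t+1) := List.count_pos_iff.mp (by unfold pvCnt at this; exact_mod_cast this)
  exact List.mem_of_mem_take this

lemma lead_head (a : Int) (t : List Int) : pvLead (a :: t) 0 a := by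
  unfold pvLead pvM pvCnt
  simp

lemma cnt_pos_self (c : Int) (P : List Int) : 0 < pvCnt c (P ++ [c]) := by
  unfold pvCnt
  exact_mod_cast List.count_pos_iff.mpr (by simp)

lemma pvW_append (P : List Int) (c k : Int) :
    pvW (P ++ [c]) k = pvW P k +
      (if pvCnt k (P ++ [c]) = pvM (P ++ [c]) then 1 else 0) := by
  unfold pvW
  rw [List.length_append, List.length_singleton, List.range_succ, List.countP_append]
  have h1 : (List.range P.length).countP
      (fun t => pvCnt k ((P ++ [c]).take (t+1)) == pvM ((P ++ [c]).take (t+1)))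
      = (List.range P.length).countP
      (fun t => pvCnt k (P.take (t+1)) == pvM (P.take (t+1))) := by
    apply List.countP_congr
    intro t ht
    rw [List.mem_range] at ht
    rw [List.take_append_of_le_length (by omega)]
  have h2 : (P ++ [c]).take (P.length + 1) = P ++ [c] := by
    apply List.take_of_length_le
    simp
  rw [h1]
  simp only [List.countP_cons, List.countP_nil, h2]
  push_cast
  split <;> simp_all

lemma foldl_max_const (f : Int → Int) (K : List Int) (m : Int) (h : ∀ k ∈ K, f k ≤ m) :
    K.foldl (fun a k => max a (f k)) m = m := by
  induction K with
  | nil => rfl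
  | cons k K ih =>
    simp only [List.foldl_cons]
    rw [max_eq_left (h k (by simp))]
    exact ih (fun k' hk' => h k' (by simp [hk']))

lemma fold_max_eq_pvM (K P : List Int) (hsub : ∀ k ∈ P, k ∈ K) :
    K.foldl (fun a k => max a (pvCnt k P)) 0 = pvM P := by
  apply le_antisymm
  · rw [← List.foldl_map (f := fun k => pvCnt k P) (g := max)]
    rcases PySem.List.foldl_max_mem (K.map (fun k => pvCnt k P)) 0 with h | h
    · rw [h]; exact pvM_nonneg _
    · obtain ⟨k, _, he⟩ := List.mem_map.mp h
      rw [← he]; exact cnt_le_pvM _ _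
  · rcases pvM_mem_or P with h | ⟨k, hk, he⟩
    · rw [h]; exact (PySem.List.le_foldl_max_int K (fun k => pvCnt k P) 0).1
    · rw [← he]
      exact (PySem.List.le_foldl_max_int K (fun k => pvCnt k P) 0).2 k (hsub k hk)

lemma scan_saturated (f : Int → Int) (K : List Int) :
    ∀ (m : Int) (s : List Int),
    K.Nodup → (∀ k ∈ K, f k ≤ m) → (∀ k ∈ K, k ∉ s) →
    K.foldl (fun cm k =>
        if f k > cm.1 then (f k, [k])
        else if f k == cm.1 then (cm.1, PySem.Set.add cm.2 k)
        else cm) (m, s)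
      = (m, s ++ K.filter (fun k => f k == m)) := by
  induction K with
  | nil => intro m s _ _ _; simp
  | cons k K ih =>
    intro m s hnd hle hs
    simp only [List.foldl_cons]
    have hk : ¬ f k > m := by simp; exact hle k (by simp)
    rw [if_neg hk]
    by_cases he : f k == m
    · rw [if_pos he]
      have hadd : PySem.Set.add s k = s ++ [k] :=
        PySem.Set.add_of_not_mem (hs k (by simp))
      rw [hadd]
      rw [ih m (s ++ [k]) hnd.of_cons (fun k' hk' => hle k' (by simp [hk']))
        (fun k' hk' => by
          simp only [List.mem_append, List.mem_singleton]
          push_neg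
          exact ⟨hs k' (by simp [hk']), fun h => (List.Nodup.notMem hnd (h ▸ hk')).elim⟩)]
      simp [List.filter_cons, he]
    · rw [if_neg he]
      rw [ih m s hnd.of_cons (fun k' hk' => hle k' (by simp [hk'])) (fun k' hk' => hs k' (by simp [hk']))]
      simp [List.filter_cons, he]

lemma scan_main (f : Int → Int) (K : List Int) :
    ∀ (m : Int) (s : List Int),
    K.Nodup → (∃ k ∈ K, m < f k) →
    K.foldl (fun cm k =>
        if f k > cm.1 then (f k, [k])
        else if f k == cm.1 then (cm.1, PySem.Set.add cm.2 k)
        else cm) (m, s)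
      = (K.foldl (fun a k => max a (f k)) m,
         K.filter (fun k => f k == K.foldl (fun a k => max a (f k)) m)) := by
  induction K with
  | nil => rintro m s _ ⟨k, h, _⟩; exact absurd h (by simp)
  | cons k K ih =>
    intro m s hnd hex
    simp only [List.foldl_cons]
    by_cases h1 : f k > m
    · rw [if_pos h1, max_eq_right (le_of_lt h1)]
      by_cases hex' : ∃ k' ∈ K, f k < f k'
      · have hlt : f k < K.foldl (fun a k => max a (f k)) (f k) := by
          obtain ⟨k', hk', hltk⟩ := hex'
          exact lt_of_lt_of_le hltk ((PySem.List.le_foldl_max_int K f (f k)).2 k' hk')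
        rw [ih (f k) [k] hnd.of_cons hex', List.filter_cons,
          if_neg (by simp only [beq_iff_eq]; omega)]
      · push_neg at hex'
        rw [scan_saturated f K (f k) [k] hnd.of_cons hex'
          (fun k' hk' => by
            simp only [List.mem_singleton]
            exact fun h => (List.Nodup.notMem hnd (h ▸ hk')).elim),
          foldl_max_const f K (f k) hex', List.filter_cons, if_pos (by simp)]
        rfl
    · rw [if_neg h1]
      have hmax : max m (f k) = m := by omega
      rw [hmax]
      have hex2 : ∃ k' ∈ K, m < f k' := by
        obtain ⟨k0, hk0, hltk⟩ := hex
        rcases List.mem_cons.mp hk0 with rfl | hk0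
        · omega
        · exact ⟨k0, hk0, hltk⟩
      have hlt : m < K.foldl (fun a k => max a (f k)) m := by
        obtain ⟨k', hk', hltk⟩ := hex2
        exact lt_of_lt_of_le hltk ((PySem.List.le_foldl_max_int K f m).2 k' hk')
      have hne : f k ≠ K.foldl (fun a k => max a (f k)) m := fun hE => h1 (hE ▸ hlt)
      by_cases he : f k == m
      · rw [if_pos he, ih m _ hnd.of_cons hex2, List.filter_cons, if_neg (by simpa using hne)]
      · rw [if_neg he, ih m s hnd.of_cons hex2, List.filter_cons, if_neg (by simpa using hne)]

lemma canonS_prefix (K P R : List Int) (t : Nat) (ht : t < P.length) :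
    canonS K (P ++ R) t = canonS K P t := by
  unfold canonS
  rw [List.take_append_of_le_length (by exact ht)]

lemma aCount_eq_modify (d : PySem.Dict Int Int) (c : Int) :
    aCount d c = d.modify c 0 (· + 1) := by
  unfold aCount
  by_cases h : d.getD c 0 == 0
  · rw [if_pos h]
    rw [beq_iff_eq] at h
    simp [PySem.Dict.modify, PySem.Dict.getD_insert, PySem.Dict.insert_insert_self, h]
  · rw [if_neg h]

lemma dict0_items (l : List Int) :
    ∀ d : PySem.Dict Int (Int × List Int),
    (l.foldl aSeed d).items
      = d.items ++ ((PySem.Set.ofList l).filter (fun k => !(d.contains k))).map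
          (fun k => (k, ((0 : Int), ([] : List Int)))) := by
  induction l with
  | nil => intro d; simp [PySem.Set.ofList]
  | cons c l ih =>
    intro d
    simp only [List.foldl_cons]
    rw [PySem.Set.ofList_cons]
    by_cases h : (d.get? c).isNone
    · have hnc : d.contains c = false := by
        rw [PySem.Dict.contains_eq_isSome_get?]
        simp [Option.isNone_iff_eq_none.mp h]
      rw [show aSeed d c = d.insert c ((0:Int), ([]:List Int)) from if_pos h]
      rw [ih]
      have hitems : (d.insert c ((0:Int), ([]:List Int))).items
          = d.items ++ [(c, ((0:Int), ([]:List Int)))] := by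
        simp [PySem.Dict.insert, hnc]
      have hfil : (PySem.Set.ofList l).filter
            (fun k => !((d.insert c ((0:Int), ([]:List Int))).contains k))
          = ((PySem.Set.ofList l).discard c).filter (fun k => !(d.contains k)) := by
        simp only [PySem.Set.discard, List.filter_filter]
        apply List.filter_congr
        intro k _
        rw [PySem.Dict.contains_insert]
        cases hkc : k == c <;> cases hdc : d.contains k <;> simp [hkc, hdc]
      rw [hitems, hfil, List.filter_cons]
      simp only [hnc, Bool.not_false, if_pos, List.map_cons, List.append_assoc,
        List.singleton_append]
    · have hc : d.contains c = true := by
        rw [PySem.Dict.contains_eq_isSome_get?]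
        simpa [Option.isSome_iff_ne_none] using h
      rw [show aSeed d c = d from if_neg h, ih]
      have hfil : (c :: (PySem.Set.ofList l).discard c).filter (fun k => !(d.contains k))
          = (PySem.Set.ofList l).filter (fun k => !(d.contains k)) := by
        rw [List.filter_cons]
        simp only [hc, Bool.not_true, if_neg, Bool.false_eq_true, not_false_iff]
        simp only [PySem.Set.discard, List.filter_filter]
        apply List.filter_congr
        intro k _
        cases hkc : k == c
        · simp [hkc]
        · have : k = c := by simpa using hkc
          simp [this, hc]
      rw [hfil]

lemma A_step_eq (K : List Int) (hnd : K.Nodup) (P : List Int) (c : Int)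
    (hsub : ∀ k ∈ P ++ [c], k ∈ K) (M : List (PySem.Set Int)) :
    aStep (canonD K P, M) ((P.length : Int), c)
      = (canonD K (P ++ [c]), M ++ [canonS K (P ++ [c]) P.length]) := by
  have hcK : c ∈ K := hsub c (by simp)
  have htk : (P ++ [c]).take (P.length + 1) = P ++ [c] :=
    List.take_of_length_le (by simp)
  -- the updated dict, at the items level (let-free, matching the zeta-reduced goal)
  have hDitems : (canonD K P).items.map (fun p =>
        (p.1, (if c == p.1 then p.2.1 + 1 else p.2.1,
               p.2.2 ++ [if c == p.1 then p.2.1 + 1 else p.2.1])))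
      = (canonD K (P ++ [c])).items := by
    unfold canonD
    rw [List.map_map]
    apply List.map_congr_left
    intro k _
    simp only [Function.comp]
    refine Prod.ext rfl (Prod.ext ?_ ?_)
    · show (if c == k then pvCnt k P + 1 else pvCnt k P) = pvCnt k (P ++ [c])
      rw [cnt_append_singleton]
      split <;> omega
    · show ((List.range P.length).map (fun j => pvCnt k (P.take (j+1)))
          ++ [if c == k then pvCnt k P + 1 else pvCnt k P])
        = (List.range (P ++ [c]).length).map (fun j => pvCnt k ((P ++ [c]).take (j+1)))
      rw [List.length_append, List.length_singleton, List.range_succ, List.map_append]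
      congr 1
      · apply List.map_congr_left
        intro j hj
        rw [List.mem_range] at hj
        rw [List.take_append_of_le_length (by omega)]
      · simp only [List.map_cons, List.map_nil, htk]
        rw [cnt_append_singleton]
        congr 1
        split <;> omega
  have hD : PySem.Dict.mk ((canonD K P).items.map (fun p =>
        (p.1, (if c == p.1 then p.2.1 + 1 else p.2.1,
               p.2.2 ++ [if c == p.1 then p.2.1 + 1 else p.2.1]))))
      = canonD K (P ++ [c]) := by
    apply PySem.Dict.ext
    rw [hDitems]
  have hpos : (0:Int) < pvCnt c (P ++ [c]) := by
    unfold pvCnt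
    exact_mod_cast List.count_pos_iff.mpr (by simp)
  have hfold : (canonD K (P ++ [c])).items.foldl (fun cm p =>
        if PySem.List.pyGetD p.2.2 ((P.length : Int)) 0 > cm.1
          then (PySem.List.pyGetD p.2.2 ((P.length : Int)) 0, [p.1])
        else if PySem.List.pyGetD p.2.2 ((P.length : Int)) 0 == cm.1
          then (cm.1, PySem.Set.add cm.2 p.1)
        else cm) ((0:Int), PySem.Set.empty)
      = (pvM (P ++ [c]), canonS K (P ++ [c]) P.length) := by
    unfold canonD
    show (K.map _).foldl _ _ = _
    rw [List.foldl_map]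
    rw [PySem.List.foldl_congr_mem _ _
      (fun cm k =>
        if pvCnt k (P ++ [c]) > cm.1 then (pvCnt k (P ++ [c]), [k])
        else if pvCnt k (P ++ [c]) == cm.1 then (cm.1, PySem.Set.add cm.2 k)
        else cm) _
      (by
        intro acc k _
        simp only [PySem.List.pyGetD_natCast]
        rw [PySem.List.getD_map_range _ _ _ _ (by simp), htk])]
    rw [scan_main (fun k => pvCnt k (P ++ [c])) K 0 PySem.Set.empty hnd ⟨c, hcK, hpos⟩]
    rw [fold_max_eq_pvM K (P ++ [c]) (fun k hk => hsub k hk)]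
    unfold canonS
    rw [htk]
  unfold aStep
  simp only []
  rw [hDitems, hfold]


lemma A_mainloop (K : List Int) (hnd : K.Nodup) (L : List Int) (hsub : ∀ k ∈ L, k ∈ K) :
    (PySem.List.enumerate L 0).foldl aStep (canonD K [], ([] : List (PySem.Set Int)))
      = (canonD K L, (List.range L.length).map (fun t => canonS K L t)) := by
  induction L using List.reverseRecOn with
  | nil => simp [PySem.List.enumerate]
  | append_singleton P c ih =>
    have hsubP : ∀ k ∈ P, k ∈ K := fun k hk => hsub k (by simp [hk])
    rw [PySem.List.enumerate_append, List.foldl_append, ih hsubP]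
    rw [PySem.List.enumerate_cons]
    simp only [PySem.List.enumerate_nil, List.foldl_cons, List.foldl_nil, zero_add]
    rw [A_step_eq K hnd P c hsub _]
    congr 1
    rw [List.length_append, List.length_singleton, List.range_succ, List.map_append]
    congr 1
    · apply List.map_congr_left
      intro t ht
      rw [List.mem_range] at ht
      exact (canonS_prefix K P [c] t ht).symm

lemma A_pack (L : List Int) (hL : L ≠ []) :
    ∃ ks : List Int, ks.Nodup ∧ (∀ k, k ∈ ks ↔ ∃ t < L.length, pvLead L t k) ∧
      get_maximum_maxima L
        = (PySem.List.max? (ks.map (fun k => pvW L k)) (fun v => v)).getD 0 := by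
  have hndK : (PySem.Set.ofList L).Nodup := PySem.Set.nodup_ofList L
  have hsub : ∀ k ∈ L, k ∈ PySem.Set.ofList L := fun k hk => (PySem.Set.mem_ofList L k).mpr hk
  -- the seeded dict is the canonical empty-history dict over the distinct categories
  have h0 : L.foldl aSeed PySem.Dict.empty = canonD (PySem.Set.ofList L) [] := by
    apply PySem.Dict.ext
    rw [dict0_items]
    simp [canonD, pvCnt, PySem.Dict.contains, PySem.Dict.empty]
  have hmain := A_mainloop (PySem.Set.ofList L) hndK L hsub
  -- Dict2 is Counter(flattened maxArr)
  have hinner : ∀ (d : PySem.Dict Int Int) (cats : List Int),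
      cats.foldl aCount d = cats.foldl (fun d x => d.modify x 0 (· + 1)) d :=
    fun d cats => PySem.List.foldl_congr_mem _ _ _ _ (fun acc c _ => aCount_eq_modify acc c)
  have hd2 : ((List.range L.length).map (fun t => canonS (PySem.Set.ofList L) L t)).foldl
        (fun d2 cats => cats.foldl aCount d2) PySem.Dict.empty
      = PySem.Dict.counter ((List.range L.length).map (fun t => canonS (PySem.Set.ofList L) L t)).flatten := by
    rw [PySem.List.foldl_congr_mem _ _ (fun d2 cats => cats.foldl (fun d x => d.modify x 0 (· + 1)) d2) _
      (fun acc cats _ => hinner acc cats)]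
    rw [← List.foldl_flatten, ← PySem.Dict.counter_eq_foldl]
  -- the program's value
  have hprog : get_maximum_maxima L
      = (PySem.List.max? (PySem.Dict.counter ((List.range L.length).map
          (fun t => canonS (PySem.Set.ofList L) L t)).flatten).values (fun v => v)).getD 0 := by
    unfold get_maximum_maxima
    simp only []
    rw [h0, hmain]
    simp only []
    rw [hd2]
  set F := ((List.range L.length).map (fun t => canonS (PySem.Set.ofList L) L t)).flatten with hF
  refine ⟨(PySem.Dict.counter F).keys, PySem.Dict.nodup_keys_counter F, ?_, ?_⟩
  · intro k
    rw [PySem.Dict.keys_counter, PySem.Set.mem_ofList, hF, List.mem_flatten]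
    constructor
    · rintro ⟨S, hS, hkS⟩
      obtain ⟨t, ht, rfl⟩ := List.mem_map.mp hS
      rw [List.mem_range] at ht
      obtain ⟨hkK, hcond⟩ := List.mem_filter.mp hkS
      exact ⟨t, ht, by simpa [pvLead] using hcond⟩
    · rintro ⟨t, ht, hlead⟩
      refine ⟨canonS (PySem.Set.ofList L) L t, List.mem_map.mpr ⟨t, List.mem_range.mpr ht, rfl⟩, ?_⟩
      apply List.mem_filter.mpr
      exact ⟨hsub k (pvLead_mem L t k ht hlead), by simpa [pvLead] using hlead⟩
  · rw [hprog]
    rw [PySem.Dict.values_eq_map_keys _ (PySem.Dict.nodup_keys_counter F) 0]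
    congr 1
    congr 1
    apply List.map_congr_left
    intro k hk
    rw [PySem.Dict.getD_counter]
    -- count of k in the flattened leader sets = number of prefixes k leads
    have hkK : k ∈ PySem.Set.ofList L := by
      rw [PySem.Dict.keys_counter, PySem.Set.mem_ofList, hF, List.mem_flatten] at hk
      obtain ⟨S, hS, hkS⟩ := hk
      obtain ⟨t, _, rfl⟩ := List.mem_map.mp hS
      exact (List.mem_filter.mp hkS).1
    rw [hF, List.count_flatten, List.map_map]
    unfold pvW
    congr 1
    have hcnt : ∀ t ∈ List.range L.length,
        ((List.count k ∘ fun t => canonS (PySem.Set.ofList L) L t) t)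
          = (if (pvCnt k (L.take (t+1)) == pvM (L.take (t+1))) then 1 else 0) := by
      intro t _
      simp only [Function.comp]
      unfold canonS
      rw [List.Nodup.count (List.Nodup.filter _ hndK)]
      simp only [List.mem_filter]
      by_cases hc : (pvCnt k (L.take (t+1)) == pvM (L.take (t+1)))
      · simp [hc, hkK]
      · simp [hc]
    rw [List.map_congr_left hcnt, PySem.List.sum_map_ite_one_zero_nat]

lemma B_step (P : List Int) (st : PySem.Dict Int Int × PySem.Dict Int Int × Int × List Int)
    (c : Int) (h : InvB P st) : InvB (P ++ [c]) (bStep st c) := by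
  obtain ⟨h1, h2, h3, h4, h5, h6, h7⟩ := h
  have hn : st.1.getD c 0 + 1 = pvCnt c (P ++ [c]) := by
    rw [h1, cnt_append_singleton]; simp
  have htake : (P ++ [c]).take (P.length + 1) = P ++ [c] :=
    List.take_of_length_le (by simp)
  -- the updated (curmax, leaders) pair
  have hcl : (if st.1.getD c 0 + 1 > st.2.2.1 then (st.1.getD c 0 + 1, [c])
        else if st.1.getD c 0 + 1 == st.2.2.1 then (st.2.2.1, st.2.2.2 ++ [c])
        else (st.2.2.1, st.2.2.2)) = (pvM (P ++ [c]),
          (if st.1.getD c 0 + 1 > st.2.2.1 then [c]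
           else if st.1.getD c 0 + 1 == st.2.2.1 then st.2.2.2 ++ [c] else st.2.2.2)) := by
    rw [hn, h2, pvM_append]
    have := cnt_le_pvM c P
    have hc1 : pvCnt c (P ++ [c]) = pvCnt c P + 1 := by
      rw [cnt_append_singleton]; simp
    split_ifs with hgt hle
    · simp; omega
    · simp at hle ⊢; omega
    · simp at hgt hle ⊢; omega
  have hc1 : pvCnt c (P ++ [c]) = pvCnt c P + 1 := by
    rw [cnt_append_singleton]; simp
  have hpos := cnt_pos_self c P
  -- characterize the updated leaders list
  suffices H : ∀ ldr : List Int, ldr.Nodup →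
      (∀ k, k ∈ ldr ↔ pvCnt k (P ++ [c]) = pvM (P ++ [c])) →
      InvB (P ++ [c]) (st.1.insert c (st.1.getD c 0 + 1),
        ldr.foldl (fun w k => w.insert k (w.getD k 0 + 1)) st.2.1, pvM (P ++ [c]), ldr) by
    unfold bStep
    simp only []
    rw [hcl]
    simp only []
    apply H
    · rcases lt_trichotomy (pvCnt c (P ++ [c])) (pvM P) with hlt | heq | hgt
      · rw [if_neg (by rw [hn, h2]; omega), if_neg (by rw [hn, h2]; simp; omega)]
        exact h3
      · rw [if_neg (by rw [hn, h2]; omega), if_pos (by rw [hn, h2]; simp [heq])]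
        have hcnl : c ∉ st.2.2.2 := fun hc => by
          have := ((h4 c).mp hc).2
          omega
        rw [List.nodup_append]
        refine ⟨h3, List.nodup_singleton c, ?_⟩
        intro a ha b hb heq
        simp only [List.mem_singleton] at hb
        exact hcnl ((heq.trans hb) ▸ ha)
      · rw [if_pos (by rw [hn, h2]; omega)]
        simp
    · intro k
      rcases lt_trichotomy (pvCnt c (P ++ [c])) (pvM P) with hlt | heq | hgt
      · -- count below current max: leaders unchanged
        rw [if_neg (by rw [hn, h2]; omega), if_neg (by rw [hn, h2]; simp; omega)]
        have hPne : P ≠ [] := by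
          intro hP
          subst hP
          have h0 : pvM ([] : List Int) = 0 := rfl
          have := cnt_pos_self c []
          omega
        have hMeq : pvM (P ++ [c]) = pvM P := by
          rw [pvM_append]; omega
        rw [hMeq]
        by_cases hkc : k = c
        · subst hkc
          simp only [h4]
          constructor
          · rintro ⟨-, hk⟩; omega
          · intro hk; omega
        · have : pvCnt k (P ++ [c]) = pvCnt k P := by
            rw [cnt_append_singleton, if_neg (by simpa using Ne.symm hkc)]; omega
          rw [this, h4]
          simp [hPne]
      · -- ties the current max: k joins the leaders
        rw [if_neg (by rw [hn, h2]; omega), if_pos (by rw [hn, h2]; simp [heq])]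
        have hPne : P ≠ [] := by
          intro hP
          subst hP
          have h0 : pvM ([] : List Int) = 0 := rfl
          have := cnt_pos_self c []
          omega
        have hMeq : pvM (P ++ [c]) = pvM P := by
          rw [pvM_append]; omega
        rw [List.mem_append, List.mem_singleton, hMeq]
        by_cases hkc : k = c
        · subst hkc; simp [heq]
        · have : pvCnt k (P ++ [c]) = pvCnt k P := by
            rw [cnt_append_singleton, if_neg (by simpa using Ne.symm hkc)]; omega
          rw [this, h4]
          simp [hPne, hkc]
      · -- a new strict max: leaders reset to [c]
        rw [if_pos (by rw [hn, h2]; omega)]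
        have hMeq : pvM (P ++ [c]) = pvCnt c (P ++ [c]) := by
          rw [pvM_append]; omega
        rw [List.mem_singleton, hMeq]
        by_cases hkc : k = c
        · subst hkc; simp
        · have : pvCnt k (P ++ [c]) = pvCnt k P := by
            rw [cnt_append_singleton, if_neg (by simpa using Ne.symm hkc)]; omega
          have hle := cnt_le_pvM k P
          simp only [hkc, false_iff]
          omega
  -- the invariant from the characterized leaders
  intro ldr hldrnd hldrmem
  refine ⟨?_, rfl, hldrnd, ?_, ?_, ?_, ?_⟩
  · intro k
    show (st.1.insert c (st.1.getD c 0 + 1)).getD k 0 = _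
    rw [PySem.Dict.getD_insert]
    by_cases hkc : k = c
    · subst hkc; rw [if_pos rfl, hn]
    · rw [if_neg hkc, h1, cnt_append_singleton, if_neg (by simpa using Ne.symm hkc)]
      omega
  · intro k
    show k ∈ ldr ↔ _
    rw [hldrmem k]
    simp
  · exact PySem.Dict.nodup_keys_foldl_insert _ _ _ h5
  · intro k
    show k ∈ (ldr.foldl (fun w k => w.insert k (w.getD k 0 + 1)) st.2.1).keys ↔ _
    rw [PySem.Dict.keys_foldl_insert, PySem.Set.mem_update, h6, hldrmem]
    constructor
    · rintro (⟨t, ht, hlead⟩ | hlast)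
      · exact ⟨t, by simpa using Nat.lt_succ_of_lt ht,
          (pvLead_prefix P [c] t k ht).mpr hlead⟩
      · refine ⟨P.length, by simp, ?_⟩
        unfold pvLead
        rw [htake]
        exact hlast
    · rintro ⟨t, ht, hlead⟩
      simp only [List.length_append, List.length_singleton] at ht
      by_cases htP : t < P.length
      · exact Or.inl ⟨t, htP, (pvLead_prefix P [c] t k htP).mp hlead⟩
      · right
        have : t = P.length := by omega
        subst this
        unfold pvLead at hlead
        rwa [htake] at hlead
  · intro k
    show (ldr.foldl (fun w k => w.insert k (w.getD k 0 + 1)) st.2.1).getD k 0 = _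
    rw [PySem.Dict.getD_foldl_insert_add_one, h7, pvW_append, List.Nodup.count hldrnd]
    simp only [hldrmem k]
    split <;> simp

lemma B_run (R : List Int) : ∀ (P : List Int) st, InvB P st → InvB (P ++ R) (R.foldl bStep st) := by
  induction R with
  | nil => intro P st h; simpa using h
  | cons c R ih =>
    intro P st h
    rw [show P ++ c :: R = (P ++ [c]) ++ R by simp]
    exact ih (P ++ [c]) (bStep st c) (B_step P st c h)

lemma B_pack (L : List Int) (hL : L ≠ []) :
    ∃ ks : List Int, ks.Nodup ∧ (∀ k, k ∈ ks ↔ ∃ t < L.length, pvLead L t k) ∧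
      get_maximum_maxima_alt L
        = (PySem.List.max? (ks.map (fun k => pvW L k)) (fun v => v)).getD 0 := by
  have h0 : InvB [] (PySem.Dict.empty, PySem.Dict.empty, 0, []) := by
    refine ⟨?_, rfl, List.nodup_nil, ?_, ?_, ?_, ?_⟩
    · intro k; rfl
    · intro k; simp
    · exact List.nodup_nil
    · intro k; simp [PySem.Dict.keys, PySem.Dict.empty]
    · intro k; rfl
  have hinv : InvB L (L.foldl bStep (PySem.Dict.empty, PySem.Dict.empty, 0, [])) := by
    simpa using B_run L [] (PySem.Dict.empty, PySem.Dict.empty, 0, []) h0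
  obtain ⟨-, -, -, -, h5, h6, h7⟩ := hinv
  refine ⟨_, h5, h6, ?_⟩
  unfold get_maximum_maxima_alt
  simp only []
  rw [PySem.Dict.values_eq_map_keys _ h5 0]
  congr 2
  apply List.map_congr_left
  intro k _
  exact h7 k

lemma max_getD_congr (l1 l2 : List Int) (h1 : l1 ≠ []) (hm : ∀ v, v ∈ l1 ↔ v ∈ l2) :
    (PySem.List.max? l1 (fun v => v)).getD 0 = (PySem.List.max? l2 (fun v => v)).getD 0 := by
  have h2 : l2 ≠ [] := by
    obtain ⟨x, hx⟩ := List.exists_mem_of_ne_nil l1 h1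
    intro hnil
    have := (hm x).mp hx
    rw [hnil] at this
    simp at this
  cases hmax1 : PySem.List.max? l1 (fun v => v) with
  | none => exact absurd ((PySem.List.max?_eq_none_iff l1 _).mp hmax1) h1
  | some m1 =>
    cases hmax2 : PySem.List.max? l2 (fun v => v) with
    | none => exact absurd ((PySem.List.max?_eq_none_iff l2 _).mp hmax2) h2
    | some m2 =>
      simp only [Option.getD_some]
      have hm1 : m1 ∈ l2 := (hm m1).mp (PySem.List.max?_mem hmax1)
      have hm2 : m2 ∈ l1 := (hm m2).mpr (PySem.List.max?_mem hmax2)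
      exact le_antisymm (PySem.List.max?_isMax hmax2 m1 hm1) (PySem.List.max?_isMax hmax1 m2 hm2)


-- ===== VERDICT (by name: the statement is the Claim_ definition above) =====
theorem get_maximum_maxima_spec : Claim_equal_get_maximum_maxima := by
  intro L _ hpre
  unfold Spec_get_maximum_maxima
  obtain ⟨ka, hka1, hka2, hka3⟩ := A_pack L hpre
  obtain ⟨kb, hkb1, hkb2, hkb3⟩ := B_pack L hpre
  rw [hka3, hkb3]
  have hhead : ∃ t < L.length, pvLead L t (L.headI) := by
    obtain ⟨a, t, rfl⟩ := List.exists_cons_of_ne_nil hpre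
    exact ⟨0, by simp, lead_head a t⟩
  apply max_getD_congr
  · have hmem : L.headI ∈ ka := (hka2 _).mpr hhead
    intro hnil
    rw [List.map_eq_nil_iff] at hnil
    rw [hnil] at hmem
    simp at hmem
  · intro v
    simp only [List.mem_map]
    constructor
    · rintro ⟨k, hk, rfl⟩; exact ⟨k, (hkb2 k).mpr ((hka2 k).mp hk), rfl⟩
    · rintro ⟨k, hk, rfl⟩; exact ⟨k, (hka2 k).mpr ((hkb2 k).mp hk), rfl⟩
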